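-- pv_equiv track=rewrite | github.com/prabowo02/project_euler | codes/PE274.py | solve
-- ===== SOURCE A (Python) =====
-- def solve(n):
--     n += 1
--     is_primes = [True for _ in range(n)]
--     for i in range(2, n):
--         if not is_primes[i]:
--             continue
--         for j in range(i * 2, n, i):
--             is_primes[j] = False
--
--     return sum([pow(10, -1, p) for p in range(2, n) if is_primes[p] and p % 2 != 0 and p % 5 != 0])
-- ===== SOURCE B (Python) =====
-- def solve(n):
--     def is_prime_odd(p):
--         # p is odd and >= 3: trial division by odd candidates only
--         d = 3
--         while d * d <= p:
--             if p % d == 0: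
--                 return False
--             d += 2
--         return True
--
--     total = 0
--     for p in range(3, n + 1, 2):
--         if p % 5 != 0 and is_prime_odd(p):
--             total += pow(10, -1, p)
--     return total
-- ===== Notes on version B (the rewrite author's own statement) =====
-- stated objective: alternative
-- what changed: Replaced A's boolean Eratosthenes sieve (an O(n) table filled by nested marking passes) with a direct odd-step iteration that tests each candidate by trial division over odd divisors, using O(1) extra memory.
import Mathlib
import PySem

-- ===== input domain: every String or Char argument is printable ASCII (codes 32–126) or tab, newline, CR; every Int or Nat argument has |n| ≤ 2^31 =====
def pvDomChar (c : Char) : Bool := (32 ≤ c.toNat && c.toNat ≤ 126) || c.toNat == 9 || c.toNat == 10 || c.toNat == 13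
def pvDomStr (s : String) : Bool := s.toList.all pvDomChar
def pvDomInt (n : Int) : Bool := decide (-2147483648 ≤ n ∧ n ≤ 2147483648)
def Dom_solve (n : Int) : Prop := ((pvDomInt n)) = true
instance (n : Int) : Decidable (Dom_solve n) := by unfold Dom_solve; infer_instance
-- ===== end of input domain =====

-- B replaces A's boolean Eratosthenes sieve by direct odd-step iteration with trial-division
-- primality tests (alternative algorithm, O(1) extra memory; not claimed faster).

-- ===== PORT A =====
-- hand port of Python's pow(10, -1, p): the modular inverse, exact for p > 0 with gcd(10, p) = 1
-- (CPython returns the unique inverse in [0, p); Nat.gcdA gives 10*gcdA 10 p + p*gcdB 10 p = 1,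
--  and PySem.Int.mod reduces it into [0, p) exactly as Python's % does for p > 0).
-- Both Pythons call this same built-in, so both ports share this helper.
def pyInvMod10 (p : Int) : Int := PySem.Int.mod (Nat.gcdA 10 p.toNat) p

def solve (n0 : Int) : Int :=
  let n := n0 + 1
  let isPrimes : List Bool := (PySem.List.pyRange 0 n 1).map (fun _ => true)
  let sieved := (PySem.List.pyRange 2 n 1).foldl
    (fun arr i =>
      if PySem.List.pyGetD arr i false = false then arr          -- 'if not is_primes[i]: continue'
      else (PySem.List.pyRange (i * 2) n i).foldl (fun a j => a.set j.toNat false) arr)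
    isPrimes
  (((PySem.List.pyRange 2 n 1).filter
      (fun p => PySem.List.pyGetD sieved p false
          && decide (PySem.Int.mod p 2 ≠ 0) && decide (PySem.Int.mod p 5 ≠ 0))).map
    (fun p => pyInvMod10 p)).sum

-- ===== PORT B =====
-- 'while d * d <= p: if p % d == 0: return False; d += 2' of Source B's is_prime_odd
def trialDivOdd (p d : Int) : Bool :=
  if _h : d * d ≤ p then
    if PySem.Int.mod p d = 0 then false else trialDivOdd p (d + 2)
  else true
termination_by (p + 1 - d).toNat
decreasing_by
  have hd : d ≤ p := by nlinarith [sq_nonneg d, _h]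
  omega

def solve_alt (n : Int) : Int :=
  (PySem.List.pyRange 3 (n + 1) 2).foldl
    (fun total p =>
      if decide (PySem.Int.mod p 5 ≠ 0) && trialDivOdd p 3 then total + pyInvMod10 p
      else total) 0

-- ===== PRECONDITION & SPEC =====
def Spec_solve (n : Int) (out : Int) : Prop := out = solve_alt n
instance (n : Int) (out : Int) : Decidable (Spec_solve n out) := by unfold Spec_solve; infer_instance

-- ===== CLAIM (what is proved, stated in full; the proofs are below) =====
def Claim_equal_solve : Prop := ∀ (n : Int), Dom_solve n → Spec_solve n (solve n)

-- ===== LEMMAS AND PROOFS =====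

-- j was "marked composite" by the sieve's passes for moduli below k
def markedBy (k j : Int) : Prop :=
  ∃ q : Int, 2 ≤ q ∧ q < k ∧ Nat.Prime q.toNat ∧ q ∣ j ∧ 2 * q ≤ j

-- one List.set of `false` seen through pyGetD (default false absorbs out-of-range)
-- one List.set of `false` seen through pyGetD (default false absorbs out-of-range)
lemma getD_set_false (arr : List Bool) (j m : Int) (hj : 0 ≤ j) (hm : 0 ≤ m) :
    PySem.List.pyGetD (arr.set j.toNat false) m false
      = (PySem.List.pyGetD arr m false && !decide (m = j)) := by
  rw [PySem.List.pyGetD_of_nonneg _ _ hm, PySem.List.pyGetD_of_nonneg _ _ hm]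
  have hmj : m = j ↔ j.toNat = m.toNat := by omega
  simp only [List.getD, List.getElem?_set, hmj]
  by_cases h : j.toNat = m.toNat
  · simp [h]
    split <;> rfl
  · simp [h]

lemma foldl_set_false_getD (L : List Int) (arr : List Bool) (m : Int)
    (hm : 0 ≤ m) (hL : ∀ j ∈ L, 0 ≤ j) :
    PySem.List.pyGetD (L.foldl (fun a j => a.set j.toNat false) arr) m false
      = (PySem.List.pyGetD arr m false && !decide (m ∈ L)) := by
  induction L generalizing arr with
  | nil => simp
  | cons j t ih =>
    simp only [List.foldl_cons]
    rw [ih _ (fun x hx => hL x (List.mem_cons_of_mem _ hx)),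
        getD_set_false arr j m (hL j (List.mem_cons_self)) hm]
    by_cases h1 : m = j <;> by_cases h2 : m ∈ t <;> simp [h1, h2]

-- markedBy is exactly compositeness
lemma markedBy_iff(b p : Int) (h2 : 2 ≤ p) (hpb : p ≤ b) :
    markedBy b p ↔ ¬ Nat.Prime p.toNat := by
  constructor
  · rintro ⟨q, hq2, hqb, hqp, hdvd, hle⟩ hP
    have hdn : q.toNat ∣ p.toNat := by
      rw [← Int.natCast_dvd_natCast, Int.toNat_of_nonneg (by omega : (0:Int) ≤ q), Int.toNat_of_nonneg (by omega : (0:Int) ≤ p)]; exact hdvd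
    rcases (Nat.Prime.eq_one_or_self_of_dvd hP _ hdn) with h | h <;> omega
  · intro hnp
    have hp2 : 2 ≤ p.toNat := by omega
    set q := p.toNat.minFac with hq
    have hqp : q.Prime := Nat.minFac_prime (by omega)
    have hqd : q ∣ p.toNat := Nat.minFac_dvd _
    have hq2 : 2 ≤ q := hqp.two_le
    have hqne : q ≠ p.toNat := fun h => hnp (h ▸ hqp)
    have hqlt : q < p.toNat := lt_of_le_of_ne (Nat.le_of_dvd (by omega) hqd) hqne
    obtain ⟨c, hc⟩ := hqd
    have hc2 : 2 ≤ c := by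
      rcases Nat.lt_or_ge c 2 with h | h
      · interval_cases c <;> omega
      · exact h
    refine ⟨(q : Int), by exact_mod_cast hq2, by omega, by simpa using hqp, ⟨(c : Int), ?_⟩, ?_⟩
    · have : p = ((q * c : Nat) : Int) := by rw [← hc]; omega
      push_cast at this; exact this
    · have : 2 * q ≤ p.toNat := by nlinarith
      omega

-- sieve invariant: after the outer loop has processed i ∈ [2, k), a cell m is false iff markedBy k m
lemma sieve_inv(b k : Int) (hk : 2 ≤ k) (hkb : k ≤ b) (m : Int) (hm0 : 0 ≤ m) (hmb : m < b) :
    PySem.List.pyGetD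
      ((PySem.List.pyRange 2 k 1).foldl
        (fun arr i =>
          if PySem.List.pyGetD arr i false = false then arr
          else (PySem.List.pyRange (i * 2) b i).foldl (fun a j => a.set j.toNat false) arr)
        ((PySem.List.pyRange 0 b 1).map (fun _ => true))) m false
      = false ↔ markedBy k m := by
  induction k, hk using Int.le_induction generalizing m with
  | base =>
    rw [show PySem.List.pyRange 2 2 1 = [] from PySem.List.pyRange_one_eq_nil le_rfl]
    simp only [List.foldl_nil]
    rw [PySem.List.pyGetD_map_pyRange_of_nonneg _ _ _ _ hm0 hmb]
    simp only [Bool.true_eq_false, false_iff]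
    rintro ⟨q, hq2, hqk, -, -, -⟩; omega
  | succ k hk ih =>
    have hkb' : k ≤ b := by omega
    have hkltb : k < b := by omega
    rw [PySem.List.pyRange_one_succ_right (by omega), List.foldl_append, List.foldl_cons,
        List.foldl_nil]
    set F := (PySem.List.pyRange 2 k 1).foldl
        (fun arr i =>
          if PySem.List.pyGetD arr i false = false then arr
          else (PySem.List.pyRange (i * 2) b i).foldl (fun a j => a.set j.toNat false) arr)
        ((PySem.List.pyRange 0 b 1).map (fun _ => true)) with hF
    by_cases hg : PySem.List.pyGetD F k false = false
    · rw [if_pos hg]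
      have hmk : markedBy k k := (ih hkb' k (by omega) hkltb).mp hg
      have hnp : ¬ Nat.Prime k.toNat := (markedBy_iff k k (by omega) le_rfl).mp hmk
      rw [ih hkb' m hm0 hmb]
      constructor
      · rintro ⟨q, h1, h2, h3, h4, h5⟩; exact ⟨q, h1, by omega, h3, h4, h5⟩
      · rintro ⟨q, h1, h2, h3, h4, h5⟩
        refine ⟨q, h1, ?_, h3, h4, h5⟩
        rcases lt_or_eq_of_le (by omega : q ≤ k) with h | h
        · exact h
        · exact absurd (h ▸ h3) hnp
    · rw [if_neg hg]
      have hp : Nat.Prime k.toNat := by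
        by_contra hnp
        exact hg ((ih hkb' k (by omega) hkltb).mpr
          ((markedBy_iff k k (by omega) le_rfl).mpr hnp))
      have hLpos : ∀ j ∈ PySem.List.pyRange (k * 2) b k, 0 ≤ j := by
        intro j hj
        have := (PySem.List.mem_pyRange_iff_of_pos (by omega) j).mp hj
        omega
      rw [foldl_set_false_getD _ _ _ hm0 hLpos]
      have hmem : m ∈ PySem.List.pyRange (k * 2) b k ↔ k ∣ m ∧ 2 * k ≤ m := by
        rw [PySem.List.mem_pyRange_iff_of_pos (by omega)]
        constructor
        · rintro ⟨h1, h2, h3⟩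
          obtain ⟨c, hc⟩ := h3
          exact ⟨⟨c + 2, by rw [mul_add]; omega⟩, by omega⟩
        · rintro ⟨⟨c, hc⟩, h2⟩
          refine ⟨by omega, hmb, ⟨c - 2, by rw [mul_sub]; omega⟩⟩
      rw [Bool.and_eq_false_iff]
      constructor
      · rintro (h | h)
        · obtain ⟨q, h1, h2, h3, h4, h5⟩ := (ih hkb' m hm0 hmb).mp h
          exact ⟨q, h1, by omega, h3, h4, h5⟩
        · have hm' : k ∣ m ∧ 2 * k ≤ m := hmem.mp (by simpa using h)
          exact ⟨k, by omega, by omega, hp, hm'.1, hm'.2⟩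
      · rintro ⟨q, h1, h2, h3, h4, h5⟩
        rcases lt_or_eq_of_le (by omega : q ≤ k) with h | h
        · exact Or.inl ((ih hkb' m hm0 hmb).mpr ⟨q, h1, h, h3, h4, h5⟩)
        · subst h
          exact Or.inr (by simpa using hmem.mpr ⟨h4, h5⟩)

-- the sieve's final verdict on a cell p ∈ [2, b) is primality
lemma sieve_prime (b p : Int) (h2 : 2 ≤ p) (hpb : p < b) :
    PySem.List.pyGetD
      ((PySem.List.pyRange 2 b 1).foldl
        (fun arr i =>
          if PySem.List.pyGetD arr i false = false then arr
          else (PySem.List.pyRange (i * 2) b i).foldl (fun a j => a.set j.toNat false) arr)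
        ((PySem.List.pyRange 0 b 1).map (fun _ => true))) p false
      = true ↔ Nat.Prime p.toNat := by
  rw [← Bool.not_eq_false, sieve_inv b b (by omega) le_rfl p (by omega) hpb,
      markedBy_iff b p h2 (by omega), not_not]

-- B's trial-division loop, characterised over the candidates it actually visits
lemma trialDivOdd_iff(p : Int) : ∀ d : Int, 3 ≤ d →
    (trialDivOdd p d = true ↔ ∀ e : Int, d ≤ e → 2 ∣ (e - d) → e * e ≤ p → ¬ (e ∣ p)) := by
  intro d
  induction d using trialDivOdd.induct p with
  | case1 d hdp hmod =>
    intro hd3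
    rw [trialDivOdd, dif_pos hdp, if_pos hmod]
    simp only [Bool.false_eq_true, false_iff, not_forall]
    exact ⟨d, le_rfl, ⟨0, by ring⟩, hdp, by simp [(PySem.Int.mod_eq_zero_iff_dvd p d).mp hmod]⟩
  | case2 d hdp hmod ih =>
    intro hd3
    rw [trialDivOdd, dif_pos hdp, if_neg hmod]
    rw [ih (by omega)]
    constructor
    · intro h e he hpar hsq
      rcases eq_or_lt_of_le he with rfl | hlt
      · rw [← PySem.Int.mod_eq_zero_iff_dvd]; exact hmod
      · have : d + 2 ≤ e := by
          obtain ⟨c, hc⟩ := hpar; omega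
        exact h e this (by obtain ⟨c, hc⟩ := hpar; exact ⟨c - 1, by omega⟩) hsq
    · intro h e he hpar hsq
      exact h e (by omega) (by obtain ⟨c, hc⟩ := hpar; exact ⟨c + 1, by omega⟩) hsq
  | case3 d hdp =>
    intro hd3
    rw [trialDivOdd, dif_neg hdp]
    simp only [true_iff]
    intro e he hpar hsq hdvd
    nlinarith

-- for odd p ≥ 3, trial division by the odd numbers 3,5,… decides primality
lemma trialDivOdd_prime(p : Int) (h3 : 3 ≤ p) (hodd : ¬ (2:Int) ∣ p) :
    trialDivOdd p 3 = true ↔ Nat.Prime p.toNat := by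
  rw [trialDivOdd_iff p 3 le_rfl]
  constructor
  · intro h
    rw [Nat.prime_def_le_sqrt]
    refine ⟨by omega, fun m hm2 hms hmd => ?_⟩
    have hmsq : m * m ≤ p.toNat := by
      have := Nat.le_sqrt'.mp hms; nlinarith [this]
    have hmdInt : (m : Int) ∣ p := by
      have : (m : Int) ∣ (p.toNat : Int) := Int.natCast_dvd_natCast.mpr hmd
      rwa [Int.toNat_of_nonneg (by omega)] at this
    have hm2' : ¬ 2 ∣ m := by
      intro ⟨c, hc⟩
      exact hodd (dvd_trans ⟨c, by exact_mod_cast hc⟩ hmdInt)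
    have hm3 : 3 ≤ m := by omega
    have hsqInt : ((m:Int)) * m ≤ p := by
      have h' := Int.ofNat_le.mpr hmsq
      push_cast at h'
      rwa [Int.toNat_of_nonneg (by omega)] at h'
    refine h (m : Int) (by exact_mod_cast hm3) ?_ hsqInt hmdInt
    omega
  · intro hp e he hpar hsq hdvd
    have he0 : (0:Int) < e := by omega
    have hedn : e.toNat ∣ p.toNat := by
      rw [← Int.natCast_dvd_natCast, Int.toNat_of_nonneg (by omega), Int.toNat_of_nonneg (by omega)]
      exact hdvd
    rcases (Nat.Prime.eq_one_or_self_of_dvd hp _ hedn) with h | h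
    · omega
    · have : e = p := by omega
      subst this
      nlinarith

lemma sum_map_ite_filter (l : List Int) (c : Int → Bool) (f : Int → Int) :
    (l.map (fun x => if c x then f x else 0)).sum = ((l.filter c).map f).sum := by
  induction l with
  | nil => rfl
  | cons x t ih => by_cases h : c x <;> simp [h, ih]

-- the two filtered candidate lists coincide
lemma filter_lists_eq(N : Int) :
    ((PySem.List.pyRange 2 N 1).filter
        (fun p => decide (Nat.Prime p.toNat)
            && decide (PySem.Int.mod p 2 ≠ 0) && decide (PySem.Int.mod p 5 ≠ 0)))
      = ((PySem.List.pyRange 3 N 2).filter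
        (fun p => decide (PySem.Int.mod p 5 ≠ 0) && trialDivOdd p 3)) := by
  have hpair1 : ((PySem.List.pyRange 2 N 1).filter
      (fun p => decide (Nat.Prime p.toNat)
          && decide (PySem.Int.mod p 2 ≠ 0) && decide (PySem.Int.mod p 5 ≠ 0))).Pairwise (· < ·) :=
    (PySem.List.pairwise_lt_pyRange_one 2 N).filter _
  have hpair2' : (PySem.List.pyRange 3 N 2).Pairwise (· < ·) := by
    rw [PySem.List.pyRange_of_pos _ _ (by omega)]
    refine (List.pairwise_lt_range).map _ (fun a b hab => by omega)
  have hpair2 : ((PySem.List.pyRange 3 N 2).filter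
      (fun p => decide (PySem.Int.mod p 5 ≠ 0) && trialDivOdd p 3)).Pairwise (· < ·) :=
    hpair2'.filter _
  have hmem : ∀ x : Int,
      (x ∈ (PySem.List.pyRange 2 N 1).filter
        (fun p => decide (Nat.Prime p.toNat)
            && decide (PySem.Int.mod p 2 ≠ 0) && decide (PySem.Int.mod p 5 ≠ 0)))
      ↔ (x ∈ (PySem.List.pyRange 3 N 2).filter
        (fun p => decide (PySem.Int.mod p 5 ≠ 0) && trialDivOdd p 3)) := by
    intro x
    simp only [List.mem_filter, PySem.List.mem_pyRange_one,
      PySem.List.mem_pyRange_iff_of_pos (by omega : (0:Int) < 2),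
      Bool.and_eq_true, decide_eq_true_eq]
    constructor
    · rintro ⟨⟨h2, hN⟩, ⟨hp, hodd⟩, h5⟩
      have h2d : ¬ (2:Int) ∣ x := fun hd => hodd ((PySem.Int.mod_eq_zero_iff_dvd x 2).mpr hd)
      have hx2 : x ≠ 2 := by rintro rfl; exact h2d ⟨1, rfl⟩
      have h3 : 3 ≤ x := by
        rcases (Int.even_or_odd x) with he | ho
        · exact absurd he.two_dvd h2d
        · obtain ⟨c, hc⟩ := ho; omega
      have hpar : (2:Int) ∣ x - 3 := by
        rcases Int.even_or_odd x with he | ho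
        · exact absurd he.two_dvd h2d
        · obtain ⟨c, hc⟩ := ho; exact ⟨c - 1, by omega⟩
      exact ⟨⟨h3, hN, hpar⟩, h5, (trialDivOdd_prime x h3 h2d).mpr hp⟩
    · rintro ⟨⟨h3, hN, hpar⟩, h5, htd⟩
      have h2d : ¬ (2:Int) ∣ x := by
        rintro ⟨c, hc⟩; obtain ⟨e, he⟩ := hpar; omega
      exact ⟨⟨by omega, hN⟩, ⟨(trialDivOdd_prime x h3 h2d).mp htd,
        fun h => h2d ((PySem.Int.mod_eq_zero_iff_dvd x 2).mp h)⟩, h5⟩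
  have hperm := (List.perm_ext_iff_of_nodup
      (hpair1.imp ne_of_lt) (hpair2.imp ne_of_lt)).mpr hmem
  exact hperm.eq_of_pairwise (fun a b _ _ hab hba => absurd hba (lt_asymm hab)) hpair1 hpair2

-- ===== VERDICT (by name: the statement is the Claim_ definition above) =====
theorem solve_spec : Claim_equal_solve := by
  intro n _
  unfold Spec_solve solve solve_alt
  dsimp only
  -- B's side: pull the conditional addition apart into a filtered sum
  have hfun : (fun (total p : Int) =>
      if decide (PySem.Int.mod p 5 ≠ 0) && trialDivOdd p 3 then total + pyInvMod10 p else total)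
      = (fun total p => total +
          (if decide (PySem.Int.mod p 5 ≠ 0) && trialDivOdd p 3 then pyInvMod10 p else 0)) := by
    funext t p; split <;> simp
  rw [hfun, PySem.List.foldl_add, zero_add, sum_map_ite_filter]
  -- A's side: the sieve flag of each candidate is its primality
  rw [List.filter_congr (fun p hp => ?_), filter_lists_eq (n + 1)]
  have hp' := (PySem.List.mem_pyRange_one).mp hp
  have hflag := sieve_prime (n + 1) p hp'.1 hp'.2
  congr 2
  exact Bool.eq_iff_iff.mpr (by simpa using hflag)
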